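-- pv_equiv track=rewrite | github.com/tuva-health/tuva | scripts/check_metadata_description_length.py | decode_double_quoted
-- ===== SOURCE A (Python) =====
-- def decode_double_quoted(value: str) -> str:
--     escapes = {
--         '"': '"',
--         "\\": "\\",
--         "/": "/",
--         "b": "\b",
--         "f": "\f",
--         "n": "\n",
--         "r": "\r",
--         "t": "\t",
--     }
--
--     decoded: list[str] = []
--     index = 0
--     while index < len(value):
--         char = value[index]
--         if char != "\\" or index + 1 >= len(value):
--             decoded.append(char)
--             index += 1
--             continue
--
--         next_char = value[index + 1]
--         decoded.append(escapes.get(next_char, next_char))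
--         index += 2
--
--     return "".join(decoded)
-- ===== SOURCE B (Python) =====
-- import re
--
-- def decode_double_quoted(value: str) -> str:
--     escapes = {
--         '"': '"',
--         "\\": "\\",
--         "/": "/",
--         "b": "\b",
--         "f": "\f",
--         "n": "\n",
--         "r": "\r",
--         "t": "\t",
--     }
--     return re.sub(r"\\(.)", lambda m: escapes.get(m.group(1), m.group(1)),
--                   value, flags=re.DOTALL)
-- ===== Notes on version B (the rewrite author's own statement) =====
-- stated objective: faster
-- what changed: Replaced the manual index-driven while-loop with an accumulator list by a single re.sub over the pattern \\(.) with DOTALL, whose left-to-right non-overlapping matching reproduces A's pairing, double-backslash collapse, unknown-escape passthrough and lone trailing backslash; the C regex engine scans the string instead of a per-character Python loop.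
import Mathlib
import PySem

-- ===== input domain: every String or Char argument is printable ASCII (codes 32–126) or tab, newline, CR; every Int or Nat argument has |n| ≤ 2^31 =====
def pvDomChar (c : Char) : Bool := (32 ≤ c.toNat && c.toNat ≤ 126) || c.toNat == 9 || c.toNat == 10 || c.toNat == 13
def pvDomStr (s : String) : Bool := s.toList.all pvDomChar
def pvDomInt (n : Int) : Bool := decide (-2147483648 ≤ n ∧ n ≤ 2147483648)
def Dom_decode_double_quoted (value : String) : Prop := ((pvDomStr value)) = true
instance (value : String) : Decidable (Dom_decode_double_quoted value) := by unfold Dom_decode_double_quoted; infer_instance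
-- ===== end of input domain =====

-- B replaces A's manual index-driven while-loop by a single regex substitution
-- (re.sub over backslash+any-char, left-to-right) — same result, more idiomatic.


-- ===== PORT A =====
-- the `escapes` dict of A, as an association list (insertion order)
def pvEscapesA : PySem.Dict Char Char :=
  PySem.Dict.ofList [('"', '"'), ('\\', '\\'), ('/', '/'), ('b', '\x08'), ('f', '\x0c'),
   ('n', '\n'), ('r', '\r'), ('t', '\t')]

-- the while-loop of A: index into the char list, accumulator `decoded`.
-- `fuel` only makes the recursion structural; it is started at the string
-- length, enough for the loop to run to its Python termination condition.
def pvLoopA (s : List Char) (fuel : Nat) (index : Nat) (decoded : List Char) : List Char :=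
  match fuel with
  | 0 => decoded
  | fuel + 1 =>
    if h : index < s.length then
      let char := s[index]
      if char ≠ '\\' ∨ index + 1 ≥ s.length then
        pvLoopA s fuel (index + 1) (decoded ++ [char])
      else if h2 : index + 1 < s.length then
        let next_char := s[index + 1]
        pvLoopA s fuel (index + 2) (decoded ++ [PySem.Dict.getD pvEscapesA next_char next_char])
      else decoded  -- unreachable: ¬(index+1 ≥ len) gives index+1 < len
    else decoded

def decode_double_quoted (value : String) : String :=
  String.ofList (pvLoopA value.toList value.toList.length 0 [])

-- ===== PORT B =====
-- Source B's replacement function: escapes.get(c, c)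
def pvEscB (c : Char) : Char :=
  if c == '"' then '"'
  else if c == '\\' then '\\'
  else if c == '/' then '/'
  else if c == 'b' then '\x08'
  else if c == 'f' then '\x0c'
  else if c == 'n' then '\n'
  else if c == 'r' then '\r'
  else if c == 't' then '\t'
  else c

-- re.sub(r"\\(.)", repl, value, flags=re.DOTALL): the regex engine's
-- left-to-right non-overlapping scan for backslash+char pairs, ported by hand
-- (exact: the pattern matches exactly a backslash followed by any character).
def pvSubB : List Char → List Char
  | [] => []
  | '\\' :: c :: rest => pvEscB c :: pvSubB rest
  | c :: rest => c :: pvSubB rest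

def decode_double_quoted_alt (value : String) : String :=
  String.ofList (pvSubB value.toList)

-- ===== PRECONDITION & SPEC =====
def Spec_decode_double_quoted (value : String) (out : String) : Prop := out = decode_double_quoted_alt value
instance (value : String) (out : String) : Decidable (Spec_decode_double_quoted value out) := by unfold Spec_decode_double_quoted; infer_instance

-- ===== CLAIM (what is proved, stated in full; the proofs are below) =====
def Claim_equal_decode_double_quoted : Prop := ∀ (value : String), Dom_decode_double_quoted value → Spec_decode_double_quoted value (decode_double_quoted value)

-- ===== LEMMAS AND PROOFS =====

-- A's dict lookup agrees with B's replacement function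
theorem escA_eq_escB (c : Char) : PySem.Dict.getD pvEscapesA c c = pvEscB c := by
  have h : pvEscapesA =
      (((((((PySem.Dict.empty.insert '"' '"').insert '\\' '\\').insert '/' '/').insert
        'b' '\x08').insert 'f' '\x0c').insert 'n' '\n').insert 'r' '\x0d').insert 't' '\t' := by
    rfl
  rw [h]
  simp only [PySem.Dict.getD_insert, PySem.Dict.getD_empty, pvEscB, beq_iff_eq]
  split_ifs <;> simp_all

theorem pvSubB_cons_not_bs {c : Char} (h : c ≠ '\\') (rest : List Char) :
    pvSubB (c :: rest) = c :: pvSubB rest := by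
  cases rest with
  | nil => simp [pvSubB]
  | cons d tl =>
    conv_lhs => rw [pvSubB.eq_def]
    split
    · simp_all
    · rename_i heq; exact absurd (List.cons.injEq .. ▸ congrArg id heq) (by simp [h])
    · rename_i heq; injection heq with h1 h2; subst h1; subst h2; rfl

-- loop invariant: with enough fuel, the A-loop from index i yields
-- acc ++ B's scan of the suffix
theorem pvLoopA_eq (s : List Char) (fuel i : Nat) (acc : List Char)
    (hfuel : s.length ≤ i + fuel) :
    pvLoopA s fuel i acc = acc ++ pvSubB (s.drop i) := by
  induction fuel generalizing i acc with
  | zero =>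
    have : s.drop i = [] := List.drop_eq_nil_of_le (by omega)
    rw [pvLoopA, this]
    simp [pvSubB]
  | succ fuel ih =>
    by_cases h : i < s.length
    · have hdrop : s.drop i = s[i] :: s.drop (i + 1) := List.drop_eq_getElem_cons h
      by_cases hc : s[i] = '\\'
      · by_cases h2 : i + 1 < s.length
        · have hdrop2 : s.drop (i + 1) = s[i + 1] :: s.drop (i + 2) :=
            List.drop_eq_getElem_cons h2
          rw [pvLoopA, dif_pos h, if_neg (by simp [hc]; omega), dif_pos h2,
              ih (i + 2) _ (by omega), hdrop, hdrop2, hc, pvSubB, escA_eq_escB]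
          simp
        · -- trailing backslash: appended as-is by both
          have hlen : i + 1 = s.length := by omega
          have hdrop1 : s.drop (i + 1) = [] := by simp [hlen]
          rw [pvLoopA, dif_pos h, if_pos (by right; omega),
              ih (i + 1) _ (by omega), hdrop, hc, hdrop1]
          simp [pvSubB]
      · rw [pvLoopA, dif_pos h, if_pos (by left; exact hc),
            ih (i + 1) _ (by omega), hdrop, pvSubB_cons_not_bs hc]
        simp
    · have : s.drop i = [] := List.drop_eq_nil_of_le (by omega)
      rw [pvLoopA, dif_neg h, this]
      simp [pvSubB]

-- ===== VERDICT (by name: the statement is the Claim_ definition above) =====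
theorem decode_double_quoted_spec : Claim_equal_decode_double_quoted := by
  intro value _
  unfold Spec_decode_double_quoted decode_double_quoted decode_double_quoted_alt
  rw [pvLoopA_eq _ _ _ _ (by omega)]
  simp
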